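-- pv_equiv track=rewrite | github.com/blevic/project-euler | solutions/p145.py | odd_digits
-- ===== SOURCE A (Python) =====
-- def odd_digits(n):
--     r = 0
--     while n > 0:
--         r *= 10
--         if n % 2 == 0:
--             return False
--         n //= 10
--     return True
-- ===== SOURCE B (Python) =====
-- def odd_digits(n):
--     if n <= 0:
--         return True
--     return all(c in '13579' for c in str(n))
-- ===== Notes on version B (the rewrite author's own statement) =====
-- stated objective: idiomatic
-- what changed: B tests the digits through the decimal string representation (str(n) once, then a membership check of each character in '13579') instead of A's arithmetic loop of % 2 and // 10; the n <= 0 case is guarded first, matching A's behaviour where the loop never runs.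
import Mathlib
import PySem

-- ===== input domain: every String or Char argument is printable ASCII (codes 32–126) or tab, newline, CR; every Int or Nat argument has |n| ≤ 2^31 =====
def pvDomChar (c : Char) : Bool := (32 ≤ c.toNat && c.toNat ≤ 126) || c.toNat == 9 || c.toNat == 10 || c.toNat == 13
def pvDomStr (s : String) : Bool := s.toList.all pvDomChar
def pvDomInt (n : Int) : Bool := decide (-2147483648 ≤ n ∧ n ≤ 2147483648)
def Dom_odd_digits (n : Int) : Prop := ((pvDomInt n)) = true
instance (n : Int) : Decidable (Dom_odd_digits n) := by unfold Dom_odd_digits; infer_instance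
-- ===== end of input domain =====

-- B replaces A's arithmetic digit loop (% 2, // 10) by a single str(n) conversion and a
-- character-membership test against '13579' (idiomatic; same cost).

-- ===== PORT A =====
-- the while loop of A, with its (dead) accumulator r kept as in the source
def oddLoopA (r n : Int) : Bool :=
  if _h : 0 < n then
    let r' := r * 10
    if PySem.Int.mod n 2 == 0 then false
    else
      have : (PySem.Int.floordiv n 10).toNat < n.toNat := by
        rw [PySem.Int.floordiv_eq_ediv_of_pos (by omega)]; omega
      oddLoopA r' (PySem.Int.floordiv n 10)
  else true
termination_by n.toNat

def odd_digits (n : Int) : Bool := oddLoopA 0 n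

-- ===== PORT B =====
def odd_digits_alt (n : Int) : Bool :=
  if n ≤ 0 then true
  else (PySem.Int.toStr n).toList.all (fun c => "13579".toList.contains c)

-- ===== PRECONDITION & SPEC =====
def Spec_odd_digits (n : Int) (out : Bool) : Prop := out = odd_digits_alt n
instance (n : Int) (out : Bool) : Decidable (Spec_odd_digits n out) := by unfold Spec_odd_digits; infer_instance

-- ===== CLAIM (what is proved, stated in full; the proofs are below) =====
def Claim_equal_odd_digits : Prop := ∀ (n : Int), Dom_odd_digits n → Spec_odd_digits n (odd_digits n)

-- ===== LEMMAS AND PROOFS =====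

-- "all digits of n are odd", arithmetically, on Nat
def allOddNat (n : Nat) : Bool :=
  if h : n / 10 = 0 then decide (n % 2 = 1)
  else
    have : n / 10 < n := Nat.div_lt_self (by omega) (by omega)
    decide (n % 2 = 1) && allOddNat (n / 10)
termination_by n

lemma digitChar_odd (k : Nat) (hk : k < 10) :
    ("13579".toList.contains (Nat.digitChar k)) = decide (k % 2 = 1) := by
  interval_cases k <;> decide

lemma toDigitsCore_all (fuel : Nat) : ∀ (n : Nat) (acc : List Char), n < fuel →
    ((Nat.toDigitsCore 10 fuel n acc).all (fun c => "13579".toList.contains c))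
      = (allOddNat n && acc.all (fun c => "13579".toList.contains c)) := by
  induction fuel with
  | zero => intro n acc h; omega
  | succ f ih =>
    intro n acc h
    rw [Nat.toDigitsCore]
    by_cases h0 : n / 10 = 0
    · rw [if_pos h0]
      simp only [List.all_cons]
      rw [digitChar_odd _ (Nat.mod_lt _ (by omega)), Nat.mod_mod_of_dvd n (by norm_num),
        allOddNat, dif_pos h0]
    · have hnpos : 0 < n := by
        rcases Nat.eq_zero_or_pos n with h1 | h1
        · exact absurd (by simp [h1]) h0
        · exact h1
      have hn10 : n / 10 < f :=
        lt_of_lt_of_le (Nat.div_lt_self hnpos (by norm_num)) (by omega)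
      rw [if_neg h0, ih (n / 10) _ hn10]
      simp only [List.all_cons]
      rw [digitChar_odd _ (Nat.mod_lt _ (by omega)), Nat.mod_mod_of_dvd n (by norm_num)]
      conv_rhs => rw [allOddNat]
      rw [dif_neg h0]
      cases allOddNat (n / 10) <;> cases decide (n % 2 = 1) <;> simp

lemma oddLoopA_eq (m : Nat) : ∀ (r : Int), 0 < m → oddLoopA r (m : Int) = allOddNat m := by
  induction m using Nat.strong_induction_on with
  | _ m ih =>
    intro r hm
    rw [oddLoopA, dif_pos (by exact_mod_cast hm)]
    have hmod : PySem.Int.mod (m : Int) 2 = ((m % 2 : Nat) : Int) := by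
      exact_mod_cast PySem.Int.mod_natCast m 2
    have hdiv : PySem.Int.floordiv (m : Int) 10 = ((m / 10 : Nat) : Int) := by
      exact_mod_cast PySem.Int.floordiv_natCast m 10
    rw [hmod]
    by_cases he : m % 2 = 0
    · rw [if_pos (by simp [he])]
      have hd : decide (m % 2 = 1) = false := by simp [he]
      rw [allOddNat]
      split <;> rw [hd] <;> simp
    · rw [if_neg (by simp; omega)]
      have h1 : decide (m % 2 = 1) = true := by simp; omega
      show oddLoopA (r * 10) (PySem.Int.floordiv (↑m) 10) = allOddNat m
      rw [hdiv]
      by_cases h0 : m / 10 = 0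
      · rw [h0, Nat.cast_zero, oddLoopA, dif_neg (by omega), allOddNat, dif_pos h0, h1]
      · rw [ih (m / 10) (Nat.div_lt_self hm (by norm_num)) _ (Nat.pos_of_ne_zero h0)]
        conv_rhs => rw [allOddNat]
        rw [dif_neg h0, h1]
        simp

-- ===== VERDICT (by name: the statement is the Claim_ definition above) =====
theorem odd_digits_spec : Claim_equal_odd_digits := by
  intro n _
  unfold Spec_odd_digits odd_digits odd_digits_alt
  by_cases h : 0 < n
  · rw [if_neg (by omega)]
    rcases Int.eq_ofNat_of_zero_le (le_of_lt h) with ⟨m, rfl⟩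
    rw [oddLoopA_eq m 0 (by exact_mod_cast h)]
    rw [PySem.Int.toList_toStr]
    unfold PySem.Int.toChars
    rw [if_neg (by omega)]
    unfold Nat.toDigits
    rw [Int.toNat_natCast, toDigitsCore_all (m + 1) m [] (by omega)]
    simp
  · rw [if_pos (by omega), oddLoopA, dif_neg h]
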